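-- pv_equiv track=rewrite | github.com/Jinho199627/27 | 0602.py | not_prime
-- ===== SOURCE A (Python) =====
-- def not_prime(k):
--     not_prime_number = set({1})
--     for i in range(2,k+1):
--         l = 2
--         while (i * l) <= k:
--             not_prime_number.add(i * l)
--             l = l + 1
--     return not_prime_number
-- ===== SOURCE B (Python) =====
-- def not_prime(k):
--     # Sieve of Eratosthenes: only primes p (p*p <= k) mark their multiples,
--     # starting at p*p.  Produces the same set as A: {1} union composites <= k.
--     res = {1}
--     p = 2
--     while p * p <= k:
--         if p not in res:
--             m = p * p
--             while m <= k:
--                 res.add(m)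
--                 m = m + p
--         p = p + 1
--     return res
-- ===== Notes on version B (the rewrite author's own statement) =====
-- stated objective: faster
-- what changed: A marks k*l for every base i=2..k (prime or not); B is a Sieve of Eratosthenes that loops only while p*p<=k, skips bases already known composite, and marks multiples starting at p*p, producing the same set {1} union composites <= k.
import Mathlib
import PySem

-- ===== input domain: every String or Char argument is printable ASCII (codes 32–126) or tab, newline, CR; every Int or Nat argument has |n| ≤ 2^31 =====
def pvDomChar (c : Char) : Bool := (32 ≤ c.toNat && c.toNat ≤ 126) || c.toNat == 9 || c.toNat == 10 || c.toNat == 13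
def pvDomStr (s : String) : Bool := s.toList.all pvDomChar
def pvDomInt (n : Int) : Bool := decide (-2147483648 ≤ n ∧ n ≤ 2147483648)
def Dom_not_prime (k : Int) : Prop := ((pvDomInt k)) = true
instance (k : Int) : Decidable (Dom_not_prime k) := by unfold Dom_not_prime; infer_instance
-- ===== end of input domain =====

-- B replaces A's all-bases multiple marking by a Sieve of Eratosthenes (primes only, from p*p, outer loop while p*p <= k).
-- While-loops are ported as structural recursion on a fuel argument; each fuel is the exact
-- remaining-iteration bound of its loop ((k+1 - counter).toNat), so the recursion is exact.

-- ===== PORT A =====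
-- inner loop 'l = 2; while (i * l) <= k: add(i*l); l += 1'
def aInner (k i : Int) (l : Int) (S : PySem.Set Int) : Nat → PySem.Set Int
  | 0 => S
  | f + 1 =>
    if i * l ≤ k then aInner k i (l + 1) (PySem.Set.add S (i * l)) f else S

def not_prime (k : Int) : List Int :=
  (PySem.List.pyRange 2 (k + 1) 1).foldl
    (fun S i => aInner k i 2 S (k + 1 - i * 2).toNat) (PySem.Set.ofList [1])

-- ===== PORT B =====
-- inner loop 'm = p*p; while m <= k: add(m); m += p'
def bInner (k p : Int) (m : Int) (S : PySem.Set Int) : Nat → PySem.Set Int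
  | 0 => S
  | f + 1 => if m ≤ k then bInner k p (m + p) (PySem.Set.add S m) f else S

-- outer loop 'p = 2; while p * p <= k: … ; p += 1'
def bLoop (k : Int) (p : Int) (S : PySem.Set Int) : Nat → PySem.Set Int
  | 0 => S
  | f + 1 =>
    if p * p ≤ k then
      bLoop k (p + 1)
        (if PySem.Set.contains S p then S
         else bInner k p (p * p) S (k + 1 - p * p).toNat) f
    else S

def not_prime_alt (k : Int) : List Int :=
  bLoop k 2 (PySem.Set.ofList [1]) (k + 1 - 2).toNat

-- ===== PRECONDITION & SPEC =====
def Spec_not_prime (k : Int) (out : List Int) : Prop := out = not_prime_alt k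
instance (k : Int) (out : List Int) : Decidable (Spec_not_prime k out) := by unfold Spec_not_prime; infer_instance

-- ===== CLAIM (what is proved, stated in full; the proofs are below) =====
def Claim_equal_not_prime : Prop := ∀ (k : Int), Dom_not_prime k → Spec_not_prime k (not_prime k)

-- ===== LEMMAS AND PROOFS =====

-- Loop invariant: before processing base i, the set holds exactly 1 and the
-- numbers ≤ k expressible as d*l with 2 ≤ d < i, 2 ≤ l.
def InS (k i : Int) (S : List Int) : Prop :=
  ∀ m : Int, m ∈ S ↔ m = 1 ∨ ∃ d l : Int, 2 ≤ d ∧ d < i ∧ 2 ≤ l ∧ m = d * l ∧ m ≤ k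

theorem aInner_stop (k i l : Int) (S : PySem.Set Int) (h : k < i * l) :
    ∀ f, aInner k i l S f = S := by
  intro f
  cases f with
  | zero => rfl
  | succ f => simp only [aInner]; rw [if_neg (show ¬ i * l ≤ k by omega)]

theorem aInner_congr (k i : Int) (hi : 1 ≤ i) :
    ∀ (f1 f2 : Nat) (l : Int) (S : PySem.Set Int),
      (k + 1 - i * l).toNat ≤ f1 → (k + 1 - i * l).toNat ≤ f2 →
      aInner k i l S f1 = aInner k i l S f2 := by
  intro f1
  induction f1 with
  | zero =>
    intro f2 l S h1 h2
    have hg : k < i * l := by generalize i * l = A at h1 ⊢; omega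
    rw [aInner_stop k i l S hg, aInner_stop k i l S hg]
  | succ f1 ih =>
    intro f2 l S h1 h2
    by_cases hg : i * l ≤ k
    · have he : i * (l + 1) = i * l + i := by rw [mul_add, mul_one]
      cases f2 with
      | zero => exfalso; generalize i * l = A at h2 hg; omega
      | succ f2 =>
        simp only [aInner, if_pos hg]
        exact ih f2 (l + 1) _ (by generalize hA : i * l = A at he h1 hg; omega)
          (by generalize hA : i * l = A at he h2 hg; omega)
    · rw [aInner_stop k i l S (by omega), aInner_stop k i l S (by omega)]

theorem mem_aInner (k i : Int) (hi : 1 ≤ i) :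
    ∀ (f : Nat) (l : Int) (S : PySem.Set Int) (m : Int),
      (k + 1 - i * l).toNat ≤ f →
      (m ∈ aInner k i l S f ↔
        m ∈ S ∨ ∃ l', l ≤ l' ∧ m = i * l' ∧ m ≤ k) := by
  intro f
  induction f with
  | zero =>
    intro l S m h1
    have hg : k < i * l := by generalize i * l = A at h1 ⊢; omega
    rw [aInner_stop k i l S hg]
    constructor
    · exact Or.inl
    · rintro (hm | ⟨l', hl', rfl, hmk⟩)
      · exact hm
      · exfalso
        have h2 : i * l ≤ i * l' := mul_le_mul_of_nonneg_left hl' (by omega)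
        omega
    | succ f ih =>
      intro l S m h1
      by_cases hg : i * l ≤ k
      · have he : i * (l + 1) = i * l + i := by rw [mul_add, mul_one]
        simp only [aInner, if_pos hg]
        rw [ih (l + 1) _ m (by generalize hA : i * l = A at he h1 hg; omega),
          PySem.Set.mem_add]
        constructor
        · rintro ((hm | rfl) | ⟨l', hl', rfl, hmk⟩)
          · exact Or.inl hm
          · exact Or.inr ⟨l, le_rfl, rfl, hg⟩
          · exact Or.inr ⟨l', by omega, rfl, hmk⟩
        · rintro (hm | ⟨l', hl', rfl, hmk⟩)
          · exact Or.inl (Or.inl hm)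
          · rcases eq_or_lt_of_le hl' with rfl | hlt
            · exact Or.inl (Or.inr rfl)
            · exact Or.inr ⟨l', by omega, rfl, hmk⟩
      · rw [aInner_stop k i l S (by omega)]
        constructor
        · exact Or.inl
        · rintro (hm | ⟨l', hl', rfl, hmk⟩)
          · exact hm
          · exfalso
            have h2 : i * l ≤ i * l' := mul_le_mul_of_nonneg_left hl' (by omega)
            omega

theorem aInner_dups (k i : Int) :
    ∀ (f : Nat) (l : Int) (S : PySem.Set Int),
      (∀ l', l ≤ l' → i * l' ≤ k → i * l' ∈ S) →
      aInner k i l S f = S := by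
  intro f
  induction f with
  | zero => intro l S _; rfl
  | succ f ih =>
    intro l S h
    by_cases hg : i * l ≤ k
    · simp only [aInner, if_pos hg, PySem.Set.add_of_mem (h l le_rfl hg)]
      exact ih (l + 1) S (fun l' hl' hk' => h l' (by omega) hk')
    · simp only [aInner, if_neg hg]

theorem aInner_skip (k i : Int) (hi : 2 ≤ i) :
    ∀ (n : Nat) (l : Int) (S : PySem.Set Int) (f : Nat),
      (i - l).toNat = n → 2 ≤ l → l ≤ i → (k + 1 - i * l).toNat ≤ f →
      (∀ l', l ≤ l' → l' < i → i * l' ≤ k → i * l' ∈ S) →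
      aInner k i l S f = aInner k i i S (k + 1 - i * i).toNat := by
  intro n
  induction n with
  | zero =>
    intro l S f hn h2 hli h1 h
    have hl : l = i := by omega
    rw [hl] at h1 ⊢
    exact aInner_congr k i (by omega) f _ i S h1 le_rfl
  | succ n ih =>
    intro l S f hn h2 hli h1 h
    have hlt : l < i := by omega
    by_cases hg : i * l ≤ k
    · have he : i * (l + 1) = i * l + i := by rw [mul_add, mul_one]
      cases f with
      | zero => exfalso; generalize i * l = A at h1 hg; omega
      | succ f =>
        simp only [aInner, if_pos hg, PySem.Set.add_of_mem (h l le_rfl hlt hg)]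
        exact ih (l + 1) S f (by omega) (by omega) (by omega)
          (by generalize hA : i * l = A at he h1 hg; omega)
          (fun l' hl' hli' hk' => h l' (by omega) hli' hk')
    · have hgi : k < i * i := by
        have h2' : i * l ≤ i * i := mul_le_mul_of_nonneg_left hli (by omega)
        omega
      rw [aInner_stop k i l S (by omega), aInner_stop k i i S hgi]

theorem aInner_eq_bInner (k i : Int) :
    ∀ (f : Nat) (l : Int) (S : PySem.Set Int),
      aInner k i l S f = bInner k i (i * l) S f := by
  intro f
  induction f with
  | zero => intro l S; rfl
  | succ f ih =>
    intro l S
    by_cases hg : i * l ≤ k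
    · simp only [aInner, bInner, if_pos hg]
      have he : i * l + i = i * (l + 1) := by rw [mul_add, mul_one]
      rw [he, ih (l + 1)]
    · simp only [aInner, bInner, if_neg hg]

theorem step_eq (k i : Int) (S : PySem.Set Int) (hi : 2 ≤ i) (hS : InS k i S) :
    aInner k i 2 S (k + 1 - i * 2).toNat
      = (if PySem.Set.contains S i then S
         else bInner k i (i * i) S (k + 1 - i * i).toNat) := by
  by_cases hc : i ∈ S
  · rw [if_pos ((PySem.Set.contains_iff S i).mpr hc)]
    apply aInner_dups
    intro l' hl' hk'
    rcases (hS i).mp hc with h1 | ⟨d, lh, hd2, hdi, hlh2, hide, _⟩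
    · omega
    · exact (hS (i * l')).mpr (Or.inr ⟨d, lh * l', hd2, hdi, by nlinarith,
        by rw [hide]; ring, hk'⟩)
  · rw [if_neg (by rw [PySem.Set.contains_iff]; exact hc)]
    rw [aInner_skip k i hi (i - 2).toNat 2 S _ rfl le_rfl hi le_rfl
      (fun l' hl' hli' hk' =>
        (hS (i * l')).mpr (Or.inr ⟨l', i, hl', hli', hi, mul_comm i l', hk'⟩))]
    exact aInner_eq_bInner k i _ i S

theorem step_inv (k i : Int) (S : PySem.Set Int) (hi : 2 ≤ i) (hS : InS k i S) :
    InS k (i + 1) (aInner k i 2 S (k + 1 - i * 2).toNat) := by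
  intro m
  rw [mem_aInner k i (by omega) _ 2 S m le_rfl]
  constructor
  · rintro (hm | ⟨l', hl', rfl, hmk⟩)
    · rcases (hS m).mp hm with h1 | ⟨d, lh, hd2, hdi, hlh2, hde, hdk⟩
      · exact Or.inl h1
      · exact Or.inr ⟨d, lh, hd2, by omega, hlh2, hde, hdk⟩
    · exact Or.inr ⟨i, l', hi, by omega, hl', rfl, hmk⟩
  · rintro (h1 | ⟨d, lh, hd2, hdi, hlh2, rfl, hdk⟩)
    · exact Or.inl ((hS m).mpr (Or.inl h1))
    · rcases eq_or_lt_of_le (show d ≤ i by omega) with rfl | hd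
      · exact Or.inr ⟨lh, hlh2, rfl, hdk⟩
      · exact Or.inl ((hS (d * lh)).mpr (Or.inr ⟨d, lh, hd2, hd, hlh2, rfl, hdk⟩))

theorem main_lemma (k : Int) : ∀ (n : Nat) (i : Int) (S : PySem.Set Int),
    (k + 1 - i).toNat = n → 2 ≤ i → InS k i S →
    (PySem.List.pyRange i (k + 1) 1).foldl
      (fun S i => aInner k i 2 S (k + 1 - i * 2).toNat) S = bLoop k i S n := by
  intro n
  induction n with
  | zero =>
    intro i S hn h2 hS
    rw [PySem.List.pyRange_one_eq_nil (by omega)]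
    rfl
  | succ n ih =>
    intro i S hn h2 hS
    have hik : i ≤ k := by omega
    rw [PySem.List.pyRange_one_cons (by omega)]
    simp only [List.foldl_cons]
    have hstep := step_eq k i S h2 hS
    have hinv := step_inv k i S h2 hS
    have hrec := ih (i + 1) (aInner k i 2 S (k + 1 - i * 2).toNat)
      (by omega) (by omega) hinv
    rw [hrec]
    by_cases hii : i * i ≤ k
    · simp only [bLoop, if_pos hii]
      rw [hstep]
    · have hSi : aInner k i 2 S (k + 1 - i * 2).toNat = S := by
        rw [hstep]
        split_ifs with hc
        · rfl
        · have h0 : (k + 1 - i * i).toNat = 0 := by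
            generalize i * i = A at hii ⊢; omega
          rw [h0]
          rfl
      rw [hSi]
      simp only [bLoop, if_neg hii]
      have hii1 : ¬ (i + 1) * (i + 1) ≤ k := by
        have he : (i + 1) * (i + 1) = i * i + (2 * i + 1) := by ring
        generalize hA : i * i = A at he hii
        generalize hB : (i + 1) * (i + 1) = B at he
        omega
      cases n with
      | zero => rfl
      | succ n => simp only [bLoop, if_neg hii1]

-- ===== VERDICT (by name: the statement is the Claim_ definition above) =====
theorem not_prime_spec : Claim_equal_not_prime := by
  intro k _
  unfold Spec_not_prime not_prime not_prime_alt
  apply main_lemma k (k + 1 - 2).toNat 2 _ rfl (by norm_num)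
  intro m
  constructor
  · intro hm
    have hm1 : m = 1 := by simpa [PySem.Set.ofList] using hm
    exact Or.inl hm1
  · rintro (rfl | ⟨d, l, hd2, hd, -⟩)
    · simp [PySem.Set.ofList, PySem.Set.add]
    · omega
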